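-- pv_equiv track=rewrite | github.com/lidacity/osm-validator | OSM.py | CheckHighway
-- ===== SOURCE A (Python) =====
-- def CheckHighway(Ways):
--  Result = []
--  Highways = ["motorway", "trunk", "primary", "secondary", "tertiary", "unclassified", "residential", "motorway_link", "trunk_link", "primary_link", "secondary_link", "tertiary_link", ]
--  for Way in Ways:
--   Tag = Way['tags']
--   if 'highway' in Tag:
--    if Tag['highway'] not in Highways:
--     Result.append(f"памылковы 'highway'=\"{Tag['highway']}\" на way")
--     break
--  for Way in Ways:
--   Tag = Way['tags']
--   if not('highway' in Tag or 'ferry' in Tag):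
--    Result.append(f"пусты 'highway' на way")
--    break
--  return Result
-- ===== SOURCE B (Python) =====
-- def CheckHighway(Ways):
--     Valid = {"motorway", "trunk", "primary", "secondary", "tertiary", "unclassified",
--              "residential", "motorway_link", "trunk_link", "primary_link",
--              "secondary_link", "tertiary_link"}
--     Bad = None
--     Empty = False
--     for Way in Ways:
--         Tag = Way['tags']
--         if Bad is None and 'highway' in Tag and Tag['highway'] not in Valid:
--             Bad = Tag['highway']
--         if not Empty and 'highway' not in Tag and 'ferry' not in Tag:
--             Empty = True
--         if Bad is not None and Empty:
--             break
--     Result = []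
--     if Bad is not None:
--         Result.append(f"памылковы 'highway'=\"{Bad}\" на way")
--     if Empty:
--         Result.append("пусты 'highway' на way")
--     return Result
-- ===== Notes on version B (the rewrite author's own statement) =====
-- stated objective: alternative
-- what changed: Replaces A's two independent break-on-first-hit passes over Ways by one pass maintaining two slots (first invalid highway value, whether some way lacks both highway and ferry) with early exit once both slots are filled, the two messages being assembled after the loop.
import Mathlib
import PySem

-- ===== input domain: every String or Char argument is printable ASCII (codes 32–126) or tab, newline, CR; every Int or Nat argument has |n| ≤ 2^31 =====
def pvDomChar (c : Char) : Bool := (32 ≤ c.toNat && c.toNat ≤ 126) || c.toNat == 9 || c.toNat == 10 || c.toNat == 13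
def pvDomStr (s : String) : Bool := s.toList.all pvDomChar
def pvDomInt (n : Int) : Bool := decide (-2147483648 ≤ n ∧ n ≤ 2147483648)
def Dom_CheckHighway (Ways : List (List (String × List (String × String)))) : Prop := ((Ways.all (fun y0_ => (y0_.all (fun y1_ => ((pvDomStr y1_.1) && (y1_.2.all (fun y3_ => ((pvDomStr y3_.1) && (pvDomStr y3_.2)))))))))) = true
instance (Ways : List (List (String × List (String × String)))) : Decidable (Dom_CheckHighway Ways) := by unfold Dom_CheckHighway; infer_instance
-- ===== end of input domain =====

-- B fuses A's two break-on-first-hit passes into one pass with two slots and an early exit; same messages, same order.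


-- ===== PORT A =====
def pvHighways : List String := ["motorway", "trunk", "primary", "secondary", "tertiary", "unclassified", "residential", "motorway_link", "trunk_link", "primary_link", "secondary_link", "tertiary_link"]

-- first loop of A: break (append message) at the first Way whose 'highway' is invalid
def pvALoop1 : List (List (String × List (String × String))) → List String → List String
  | [], Result => Result
  | Way :: rest, Result =>
    let Tag := (Way.lookup "tags").getD []   -- Python raises KeyError when 'tags' is missing; such inputs are excluded by Pre_
    match Tag.lookup "highway" with
    | some h =>
        if h ∈ pvHighways then pvALoop1 rest Result
        else Result ++ ["памылковы 'highway'=\"" ++ h ++ "\" на way"]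
    | none => pvALoop1 rest Result

-- second loop of A: break (append message) at the first Way with neither 'highway' nor 'ferry'
def pvALoop2 : List (List (String × List (String × String))) → List String → List String
  | [], Result => Result
  | Way :: rest, Result =>
    let Tag := (Way.lookup "tags").getD []   -- Python raises KeyError when 'tags' is missing; excluded by Pre_
    if (Tag.lookup "highway").isSome || (Tag.lookup "ferry").isSome then pvALoop2 rest Result
    else Result ++ ["пусты 'highway' на way"]

def CheckHighway (Ways : List (List (String × List (String × String)))) : List String :=
  pvALoop2 Ways (pvALoop1 Ways [])

-- ===== PORT B =====
-- single pass with two slots (Bad, Empty), breaking once both are filled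
def pvBLoop : List (List (String × List (String × String))) → Option String → Bool → Option String × Bool
  | [], Bad, Empty => (Bad, Empty)
  | Way :: rest, Bad, Empty =>
    let Tag := (Way.lookup "tags").getD []   -- Python raises KeyError when 'tags' is missing; excluded by Pre_
    let hw := Tag.lookup "highway"
    let Bad' := if Bad.isNone then
        match hw with
        | some h => if h ∈ pvHighways then none else some h
        | none => none
      else Bad
    let Empty' := Empty || (hw.isNone && (Tag.lookup "ferry").isNone)
    if Bad'.isSome && Empty' then (Bad', Empty')
    else pvBLoop rest Bad' Empty'

def CheckHighway_alt (Ways : List (List (String × List (String × String)))) : List String :=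
  let r := pvBLoop Ways none false
  (match r.1 with
   | some h => ["памылковы 'highway'=\"" ++ h ++ "\" на way"]
   | none => []) ++ (if r.2 then ["пусты 'highway' на way"] else [])

-- ===== PRECONDITION & SPEC =====
-- Pre_ excludes Ways containing a dict without key 'tags': there Python's Way['tags'] raises KeyError
-- (when a tags-less way lies beyond both break points A still returns and B agrees, but a closed-form
-- precondition cannot see the break points, so all such inputs are excluded).
def Pre_CheckHighway (Ways : List (List (String × List (String × String)))) : Prop :=
  (Ways.all (fun Way => (Way.lookup "tags").isSome)) = true
instance (Ways : List (List (String × List (String × String)))) : Decidable (Pre_CheckHighway Ways) := by unfold Pre_CheckHighway; infer_instance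
def pvWitness_CheckHighway : (List (List (String × List (String × String)))) :=
  [[("tags", [("highway", "xyz")])], [("tags", [("ferry", "yes")])], [("tags", [])]]

def Spec_CheckHighway (Ways : List (List (String × List (String × String)))) (out : List String) : Prop := out = CheckHighway_alt Ways
instance (Ways : List (List (String × List (String × String)))) (out : List String) : Decidable (Spec_CheckHighway Ways out) := by unfold Spec_CheckHighway; infer_instance

-- ===== CLAIM (what is proved, stated in full; the proofs are below) =====
def Claim_equal_CheckHighway : Prop := ∀ (Ways : List (List (String × List (String × String)))), Dom_CheckHighway Ways → Pre_CheckHighway Ways → Spec_CheckHighway Ways (CheckHighway Ways)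

-- ===== LEMMAS AND PROOFS =====

-- first Way's invalid 'highway' value, if any
def pvFirstBad : List (List (String × List (String × String))) → Option String
  | [] => none
  | Way :: rest =>
    match ((Way.lookup "tags").getD []).lookup "highway" with
    | some h => if h ∈ pvHighways then pvFirstBad rest else some h
    | none => pvFirstBad rest

-- whether some Way has neither 'highway' nor 'ferry'
def pvAnyEmpty : List (List (String × List (String × String))) → Bool
  | [] => false
  | Way :: rest =>
    let Tag := (Way.lookup "tags").getD []
    (!((Tag.lookup "highway").isSome || (Tag.lookup "ferry").isSome)) || pvAnyEmpty rest

theorem pvALoop1_eq (l : List (List (String × List (String × String)))) (r : List String) :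
    pvALoop1 l r = r ++ (match pvFirstBad l with
      | some h => ["памылковы 'highway'=\"" ++ h ++ "\" на way"]
      | none => []) := by
  induction l generalizing r with
  | nil => simp [pvALoop1, pvFirstBad]
  | cons Way rest ih =>
    simp only [pvALoop1, pvFirstBad]
    cases ((Way.lookup "tags").getD []).lookup "highway" with
    | none => simpa using ih r
    | some h =>
      by_cases hmem : h ∈ pvHighways <;> simp [hmem, ih]

theorem pvALoop2_eq (l : List (List (String × List (String × String)))) (r : List String) :
    pvALoop2 l r = r ++ (if pvAnyEmpty l then ["пусты 'highway' на way"] else []) := by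
  induction l generalizing r with
  | nil => simp [pvALoop2, pvAnyEmpty]
  | cons Way rest ih =>
    simp only [pvALoop2, pvAnyEmpty]
    by_cases hc : (((Way.lookup "tags").getD []).lookup "highway").isSome
        || (((Way.lookup "tags").getD []).lookup "ferry").isSome <;>
      simp [hc, ih]

theorem pvBLoop_eq (l : List (List (String × List (String × String)))) (Bad : Option String) (Empty : Bool) :
    pvBLoop l Bad Empty = ((if Bad.isSome then Bad else pvFirstBad l), Empty || pvAnyEmpty l) := by
  induction l generalizing Bad Empty with
  | nil => cases Bad <;> simp [pvBLoop, pvFirstBad, pvAnyEmpty]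
  | cons Way rest ih =>
    simp only [pvBLoop, pvFirstBad, pvAnyEmpty]
    cases hhw : ((Way.lookup "tags").getD []).lookup "highway" with
    | none =>
      cases hf : ((Way.lookup "tags").getD []).lookup "ferry" <;> cases Bad <;> cases Empty <;>
        simp [hhw, hf, ih, Bool.or_assoc]
    | some h =>
      by_cases hmem : h ∈ pvHighways <;>
        cases hf : ((Way.lookup "tags").getD []).lookup "ferry" <;> cases Bad <;> cases Empty <;>
          simp [hhw, hf, hmem, ih, Bool.or_assoc]

-- ===== VERDICT (by name: the statement is the Claim_ definition above) =====
theorem CheckHighway_spec : Claim_equal_CheckHighway := by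
  intro Ways _ _
  show CheckHighway Ways = CheckHighway_alt Ways
  rw [CheckHighway, CheckHighway_alt, pvALoop1_eq, pvALoop2_eq, pvBLoop_eq]
  simp
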